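-- pv_equiv track=rewrite | github.com/pasta-lover69/LogSentinel | advanced_parser.py | _detect_dictionary_usernames
-- ===== SOURCE A (Python) =====
-- from typing import List, Dict, Optional, Set, Tuple
--
-- def _detect_dictionary_usernames(usernames: List[str]) -> List[str]:
--     """Detect dictionary-based username patterns"""
--     patterns = []
--
--     # Common username patterns
--     common_prefixes = ['admin', 'user', 'test', 'guest', 'root', 'service']
--     admin_keywords = ['admin', 'administrator', 'root', 'superuser', 'sa']
--
--     for prefix in common_prefixes:
--         prefix_count = sum(1 for u in usernames if u.lower().startswith(prefix))
--         if prefix_count >= 3: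
--             patterns.append(f"Dictionary pattern: {prefix_count} usernames with '{prefix}' prefix")
--
--     for keyword in admin_keywords:
--         keyword_count = sum(1 for u in usernames if keyword in u.lower())
--         if keyword_count >= 2:
--             patterns.append(f"Admin account targeting: {keyword_count} attempts on '{keyword}' accounts")
--
--     return patterns
-- ===== SOURCE B (Python) =====
-- from typing import List
--
-- def _detect_dictionary_usernames(usernames: List[str]) -> List[str]:
--     """Detect dictionary-based username patterns (single pass + count tables)."""
--     common_prefixes = ['admin', 'user', 'test', 'guest', 'root', 'service']
--     admin_keywords = ['admin', 'administrator', 'root', 'superuser', 'sa']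
--     prefix_counts = {p: 0 for p in common_prefixes}
--     keyword_counts = {k: 0 for k in admin_keywords}
--     for u in usernames:
--         ul = u.lower()
--         for p in common_prefixes:
--             if ul.startswith(p):
--                 prefix_counts[p] += 1
--         for k in admin_keywords:
--             if k in ul:
--                 keyword_counts[k] += 1
--     patterns = [f"Dictionary pattern: {c} usernames with '{p}' prefix"
--                 for p, c in prefix_counts.items() if c >= 3]
--     patterns += [f"Admin account targeting: {c} attempts on '{k}' accounts"
--                  for k, c in keyword_counts.items() if c >= 2]
--     return patterns
-- ===== Notes on version B (the rewrite author's own statement) =====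
-- stated objective: alternative
-- what changed: Instead of rescanning the username list once per pattern (11 passes, each recomputing u.lower()), B makes one pass over the usernames, lowercases each name once, and accumulates two count dictionaries; a second short pass over the fixed pattern lists emits the messages in the same order.
import Mathlib
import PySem

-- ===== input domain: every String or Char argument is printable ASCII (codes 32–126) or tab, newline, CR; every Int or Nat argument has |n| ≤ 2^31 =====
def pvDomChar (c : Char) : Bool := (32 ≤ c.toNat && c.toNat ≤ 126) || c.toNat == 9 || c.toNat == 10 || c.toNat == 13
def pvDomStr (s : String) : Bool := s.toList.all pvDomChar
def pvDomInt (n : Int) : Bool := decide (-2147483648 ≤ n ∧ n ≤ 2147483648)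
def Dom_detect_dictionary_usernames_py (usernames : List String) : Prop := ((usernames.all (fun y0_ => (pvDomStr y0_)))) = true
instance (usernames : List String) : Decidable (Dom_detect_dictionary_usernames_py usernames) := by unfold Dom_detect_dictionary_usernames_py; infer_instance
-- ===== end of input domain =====

-- B replaces A's eleven rescans of the username list (one per pattern, each recomputing
-- u.lower()) by a single pass that lowercases each name once and fills two count
-- dictionaries, followed by a short emission pass over the fixed pattern lists.


-- shared f-string formatters (identical literals in both Python sources)
def pvMsgPrefix (c : Int) (p : String) : String :=
  "Dictionary pattern: " ++ PySem.Int.toStr c ++ " usernames with '" ++ p ++ "' prefix"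
def pvMsgKeyword (c : Int) (k : String) : String :=
  "Admin account targeting: " ++ PySem.Int.toStr c ++ " attempts on '" ++ k ++ "' accounts"

-- ===== PORT A =====
def detect_dictionary_usernames_py (usernames : List String) : List String :=
  let common_prefixes := ["admin", "user", "test", "guest", "root", "service"]
  let admin_keywords := ["admin", "administrator", "root", "superuser", "sa"]
  let patterns := common_prefixes.foldl (fun pats pre =>
    let prefix_count : Int :=
      usernames.foldl (fun acc u => if PySem.Str.startswith (PySem.Str.lower u) pre then acc + 1 else acc) 0
    if 3 ≤ prefix_count then pats ++ [pvMsgPrefix prefix_count pre] else pats) []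
  admin_keywords.foldl (fun pats kw =>
    let keyword_count : Int :=
      usernames.foldl (fun acc u => if PySem.Str.isIn kw (PySem.Str.lower u) then acc + 1 else acc) 0
    if 2 ≤ keyword_count then pats ++ [pvMsgKeyword keyword_count kw] else pats) patterns

-- ===== PORT B =====
def detect_dictionary_usernames_py_alt (usernames : List String) : List String :=
  let common_prefixes := ["admin", "user", "test", "guest", "root", "service"]
  let admin_keywords := ["admin", "administrator", "root", "superuser", "sa"]
  let prefix_counts0 := common_prefixes.foldl (fun d p => d.insert p (0 : Int)) PySem.Dict.empty
  let keyword_counts0 := admin_keywords.foldl (fun d k => d.insert k (0 : Int)) PySem.Dict.empty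
  let st := usernames.foldl
    (fun (st : PySem.Dict String Int × PySem.Dict String Int) u =>
      let ul := PySem.Str.lower u
      ( common_prefixes.foldl (fun d p => if PySem.Str.startswith ul p then d.modify p 0 (· + 1) else d) st.1,
        admin_keywords.foldl (fun d k => if PySem.Str.isIn k ul then d.modify k 0 (· + 1) else d) st.2 ))
    (prefix_counts0, keyword_counts0)
  ((st.1.items.filter (fun pr => 3 ≤ pr.2)).map (fun pr => pvMsgPrefix pr.2 pr.1))
    ++ ((st.2.items.filter (fun pr => 2 ≤ pr.2)).map (fun pr => pvMsgKeyword pr.2 pr.1))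

-- ===== PRECONDITION & SPEC =====
def Spec_detect_dictionary_usernames_py (usernames : List String) (out : List String) : Prop := out = detect_dictionary_usernames_py_alt usernames
instance (usernames : List String) (out : List String) : Decidable (Spec_detect_dictionary_usernames_py usernames out) := by unfold Spec_detect_dictionary_usernames_py; infer_instance

-- ===== CLAIM (what is proved, stated in full; the proofs are below) =====
def Claim_equal_detect_dictionary_usernames_py : Prop := ∀ (usernames : List String), Dom_detect_dictionary_usernames_py usernames → Spec_detect_dictionary_usernames_py usernames (detect_dictionary_usernames_py usernames)

-- ===== LEMMAS AND PROOFS =====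

-- a fold over a pair whose components evolve independently is the pair of folds
theorem pvFoldlPair {α β γ : Type} (h : α × β → γ → α × β) (f : α → γ → α) (g : β → γ → β)
    (hh : ∀ st x, h st x = (f st.1 x, g st.2 x)) :
    ∀ (l : List γ) (a : α) (b : β), l.foldl h (a, b) = (l.foldl f a, l.foldl g b) := by
  intro l
  induction l with
  | nil => intro a b; rfl
  | cons x xs ih => intro a b; rw [List.foldl_cons, List.foldl_cons, List.foldl_cons, hh]; exact ih (f a x) (g b x)

-- adding only elements already present leaves a PySem.Set unchanged
theorem pvSetUpdateSubset (xs : List String) :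
    ∀ (s : PySem.Set String), (∀ x ∈ xs, x ∈ s) → PySem.Set.update s xs = s := by
  induction xs with
  | nil => intro s _; rfl
  | cons x xs ih =>
    intro s h
    have hx : x ∈ s := h x (by simp)
    have hadd : PySem.Set.add s x = s := by
      simp only [PySem.Set.add]
      simp [hx]
    calc PySem.Set.update s (x :: xs)
        = PySem.Set.update (PySem.Set.add s x) xs := by simp [PySem.Set.update]
      _ = s := by rw [hadd]; exact ih s (fun y hy => h y (by simp [hy]))

-- one username step: the guarded pass over the pattern list keeps the key list
theorem pvStepKeys (test : String → Bool) (L : List String) (d : PySem.Dict String Int)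
    (h : ∀ q ∈ L, q ∈ d.keys) :
    (L.foldl (fun d q => if test q then d.modify q 0 (· + 1) else d) d).keys = d.keys := by
  rw [← List.foldl_filter]
  rw [PySem.Dict.keys_foldl_modify]
  exact pvSetUpdateSubset _ _ (fun x hx => h x (List.mem_of_mem_filter hx))

-- one username step: effect on the count stored at p ∈ L (L without duplicates)
theorem pvStepGetD (test : String → Bool) (L : List String) (hL : L.Nodup)
    (p : String) (hp : p ∈ L) (d : PySem.Dict String Int) :
    (L.foldl (fun d q => if test q then d.modify q 0 (· + 1) else d) d).getD p 0
      = d.getD p 0 + (if test p then 1 else 0) := by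
  rw [← List.foldl_filter, PySem.Dict.getD_foldl_modify_add_one]
  congr 1
  by_cases h : test p
  · simp [List.count_filter, h, List.count_eq_one_of_mem hL hp]
  · have h0 : List.count p (List.filter test L) = 0 := by
      rw [List.count_eq_zero]; simp [List.mem_filter, h]
    simp [h0, h]

-- the whole username pass: keys preserved, count at p = initial + countP
theorem pvPassInv (test : String → String → Bool) (L : List String) (hL : L.Nodup) :
    ∀ (us : List String) (d : PySem.Dict String Int), (∀ q ∈ L, q ∈ d.keys) →
      ((us.foldl (fun d u => L.foldl (fun d q => if test u q then d.modify q 0 (· + 1) else d) d) d).keys = d.keys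
       ∧ ∀ p ∈ L,
          (us.foldl (fun d u => L.foldl (fun d q => if test u q then d.modify q 0 (· + 1) else d) d) d).getD p 0
            = d.getD p 0 + (us.countP (fun u => test u p) : Int)) := by
  intro us
  induction us with
  | nil => intro d h; exact ⟨rfl, fun p _ => by simp⟩
  | cons u us ih =>
    intro d h
    have hk := pvStepKeys (test u) L d h
    have h' : ∀ q ∈ L, q ∈ (L.foldl (fun d q => if test u q then d.modify q 0 (· + 1) else d) d).keys := by
      rw [hk]; exact h
    obtain ⟨ihk, ihg⟩ := ih _ h'
    refine ⟨by simpa [hk] using ihk, fun p hp => ?_⟩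
    have := ihg p hp
    simp only [List.foldl_cons] at *
    rw [this, pvStepGetD (test u) L hL p hp d]
    by_cases htp : test u p <;> simp [htp] <;> ring

-- the A-side inner count loop is countP
theorem pvCountLoop (test : String → Bool) (us : List String) :
    us.foldl (fun acc u => if test u then acc + 1 else acc) (0 : Int) = (us.countP test : Int) := by
  simpa using PySem.List.foldl_if_add_one test us 0

-- emission pass: a guarded append fold is filter-then-map over the (key, count) table
theorem pvEmit (l : List String) (c : String → Int) (t : Int) (m : Int → String → String) :
    ∀ acc : List String,
      l.foldl (fun pats x => if t ≤ c x then pats ++ [m (c x) x] else pats) acc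
        = acc ++ ((l.map (fun k => (k, c k))).filter (fun pr => t ≤ pr.2)).map (fun pr => m pr.2 pr.1) := by
  induction l with
  | nil => intro acc; simp
  | cons x xs ih =>
    intro acc
    by_cases h : t ≤ c x <;> simp [h, ih]

-- main equivalence
set_option maxHeartbeats 1000000 in
theorem pvMain (usernames : List String) :
    detect_dictionary_usernames_py usernames = detect_dictionary_usernames_py_alt usernames := by
  unfold detect_dictionary_usernames_py detect_dictionary_usernames_py_alt
  simp only []
  -- name the pattern lists and tests
  set L := ["admin", "user", "test", "guest", "root", "service"] with hLdef
  set K := ["admin", "administrator", "root", "superuser", "sa"] with hKdef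
  have hLnd : L.Nodup := by decide
  have hKnd : K.Nodup := by decide
  -- B: split the pair fold
  rw [pvFoldlPair _
    (fun (d : PySem.Dict String Int) (u : String) =>
      L.foldl (fun (d : PySem.Dict String Int) q => if PySem.Str.startswith (PySem.Str.lower u) q then PySem.Dict.modify d q 0 (· + 1) else d) d)
    (fun (d : PySem.Dict String Int) (u : String) =>
      K.foldl (fun (d : PySem.Dict String Int) q => if PySem.Str.isIn q (PySem.Str.lower u) then PySem.Dict.modify d q 0 (· + 1) else d) d)
    (fun st u => rfl)]
  -- initial dicts
  have hpc0keys : (L.foldl (fun d p => d.insert p (0 : Int)) PySem.Dict.empty).keys = L := by decide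
  have hkc0keys : (K.foldl (fun d k => d.insert k (0 : Int)) PySem.Dict.empty).keys = K := by decide
  obtain ⟨hK1, hG1⟩ := pvPassInv (fun u q => PySem.Str.startswith (PySem.Str.lower u) q) L hLnd
      usernames _ (by rw [hpc0keys]; exact fun q hq => hq)
  obtain ⟨hK2, hG2⟩ := pvPassInv (fun u q => PySem.Str.isIn q (PySem.Str.lower u)) K hKnd
      usernames _ (by rw [hkc0keys]; exact fun q hq => hq)
  -- final dicts: items as an explicit map over the key lists
  have hnd1 : (usernames.foldl (fun d u => L.foldl (fun d q => if PySem.Str.startswith (PySem.Str.lower u) q then d.modify q 0 (· + 1) else d) d) (L.foldl (fun d p => d.insert p (0 : Int)) PySem.Dict.empty)).keys.Nodup := by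
    rw [hK1, hpc0keys]; exact hLnd
  have hnd2 : (usernames.foldl (fun d u => K.foldl (fun d q => if PySem.Str.isIn q (PySem.Str.lower u) then d.modify q 0 (· + 1) else d) d) (K.foldl (fun d k => d.insert k (0 : Int)) PySem.Dict.empty)).keys.Nodup := by
    rw [hK2, hkc0keys]; exact hKnd
  have hitems1 := PySem.Dict.items_eq_map_keys _ hnd1 (0 : Int)
  have hitems2 := PySem.Dict.items_eq_map_keys _ hnd2 (0 : Int)
  rw [hK1, hpc0keys] at hitems1
  rw [hK2, hkc0keys] at hitems2
  have hval1 : ∀ p ∈ L, (usernames.foldl (fun d u => L.foldl (fun d q => if PySem.Str.startswith (PySem.Str.lower u) q then d.modify q 0 (· + 1) else d) d) (L.foldl (fun d p => d.insert p (0 : Int)) PySem.Dict.empty)).getD p 0 = (usernames.countP (fun u => PySem.Str.startswith (PySem.Str.lower u) p) : Int) := by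
    intro p hp
    rw [hG1 p hp]
    have h0 : (L.foldl (fun d p => d.insert p (0 : Int)) PySem.Dict.empty).getD p 0 = 0 := by
      rw [hLdef]; simp [List.foldl, PySem.Dict.getD_insert, PySem.Dict.getD_empty]
    rw [h0]; ring
  have hval2 : ∀ k ∈ K, (usernames.foldl (fun d u => K.foldl (fun d q => if PySem.Str.isIn q (PySem.Str.lower u) then d.modify q 0 (· + 1) else d) d) (K.foldl (fun d k => d.insert k (0 : Int)) PySem.Dict.empty)).getD k 0 = (usernames.countP (fun u => PySem.Str.isIn k (PySem.Str.lower u)) : Int) := by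
    intro k hk
    rw [hG2 k hk]
    have h0 : (K.foldl (fun d k => d.insert k (0 : Int)) PySem.Dict.empty).getD k 0 = 0 := by
      rw [hKdef]; simp [List.foldl, PySem.Dict.getD_insert, PySem.Dict.getD_empty]
    rw [h0]; ring
  -- rewrite items into maps of counts
  rw [hitems1, hitems2]
  have hmap1 : L.map (fun k => (k, (usernames.foldl (fun d u => L.foldl (fun d q => if PySem.Str.startswith (PySem.Str.lower u) q then d.modify q 0 (· + 1) else d) d) (L.foldl (fun d p => d.insert p (0 : Int)) PySem.Dict.empty)).getD k 0))
      = L.map (fun k => (k, (usernames.countP (fun u => PySem.Str.startswith (PySem.Str.lower u) k) : Int))) :=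
    List.map_congr_left (fun p hp => by rw [hval1 p hp])
  have hmap2 : K.map (fun k => (k, (usernames.foldl (fun d u => K.foldl (fun d q => if PySem.Str.isIn q (PySem.Str.lower u) then d.modify q 0 (· + 1) else d) d) (K.foldl (fun d k => d.insert k (0 : Int)) PySem.Dict.empty)).getD k 0))
      = K.map (fun k => (k, (usernames.countP (fun u => PySem.Str.isIn k (PySem.Str.lower u)) : Int))) :=
    List.map_congr_left (fun p hp => by rw [hval2 p hp])
  rw [hmap1, hmap2]
  -- A-side: counts are countP
  simp only [pvCountLoop]
  -- A's two guarded append folds are exactly B's filter-then-map emissions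
  rw [pvEmit L (fun p => ((usernames.countP (fun u => PySem.Str.startswith (PySem.Str.lower u) p) : Int))) 3 pvMsgPrefix,
      pvEmit K (fun k => ((usernames.countP (fun u => PySem.Str.isIn k (PySem.Str.lower u)) : Int))) 2 pvMsgKeyword]
  simp

-- ===== VERDICT (by name: the statement is the Claim_ definition above) =====
theorem detect_dictionary_usernames_py_spec : Claim_equal_detect_dictionary_usernames_py := by
  intro usernames _
  unfold Spec_detect_dictionary_usernames_py
  exact pvMain usernames
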